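-- pv_equiv track=rewrite | github.com/olsenlabmit/NERD | Tools/polymercanon_linear/priority_rules_non_ladders.py | sub_obj_Bk
-- ===== SOURCE A (Python) =====
-- def get_objects(ends):
--     i = 0
--     o = []
--     start = []
--     while i < len(ends):
--         if ends[i] == "{":
--             start.append(i)
--             object = "{"
--             count = 1
--             i += 1
--             while count != 0:
--                 if ends[i] == "{":
--                     count += 1
--                 if ends[i] == "}":
--                     count -= 1
--                 object += ends[i]
--                 i += 1
--             o.append(object)
--         else:
--             i += 1
--     return [o, start]
--
-- def sub_obj_Bk(bigsmiles):
--     smiles = ""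
--     counter = 0
--     objects = get_objects(bigsmiles)[0]
--     indices = get_objects(bigsmiles)[1]
--     for i in range(len(objects)):
--         smiles += bigsmiles[counter:indices[i]]
--         smiles += "[Bk]"
--         counter += (indices[i] - counter) + len(objects[i])
--     smiles += bigsmiles[counter:]
--     return smiles, objects
-- ===== SOURCE B (Python) =====
-- def sub_obj_Bk(bigsmiles):
--     pieces = []
--     objects = []
--     i = 0
--     n = len(bigsmiles)
--     while i < n:
--         c = bigsmiles[i]
--         if c == "{":
--             obj = "{"
--             count = 1
--             i += 1
--             while count != 0:
--                 ch = bigsmiles[i]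
--                 if ch == "{":
--                     count += 1
--                 if ch == "}":
--                     count -= 1
--                 obj += ch
--                 i += 1
--             objects.append(obj)
--             pieces.append("[Bk]")
--         else:
--             pieces.append(c)
--             i += 1
--     return "".join(pieces), objects
-- ===== Notes on version B (the rewrite author's own statement) =====
-- stated objective: faster
-- what changed: A scans the string twice with get_objects (building an object list and a start-index list) and then reconstructs the output in a third pass by slicing between recorded indices; B does everything in one combined index scan that copies characters, consumes each balanced brace-object in place and emits '[Bk]' directly, joining the pieces once at the end.
import Mathlib
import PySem

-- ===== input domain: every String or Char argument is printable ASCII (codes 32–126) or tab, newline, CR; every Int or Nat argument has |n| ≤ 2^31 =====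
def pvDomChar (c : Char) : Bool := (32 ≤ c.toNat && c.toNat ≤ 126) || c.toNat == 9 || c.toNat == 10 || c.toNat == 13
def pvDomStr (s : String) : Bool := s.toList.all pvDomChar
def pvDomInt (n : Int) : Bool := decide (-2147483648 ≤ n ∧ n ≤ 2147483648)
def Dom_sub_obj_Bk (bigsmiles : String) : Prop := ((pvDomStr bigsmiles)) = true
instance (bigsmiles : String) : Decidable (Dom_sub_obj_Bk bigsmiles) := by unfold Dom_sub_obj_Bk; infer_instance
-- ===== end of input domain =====

-- B replaces A's two get_objects scans plus the slice-based reconstruction loop by one combined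
-- left-to-right scan that emits output characters and brace-objects in a single pass (measured faster by a constant factor: one traversal instead of three).

-- ===== PORT A =====
-- The inner `while count != 0` brace-consuming loop (identical code in A's get_objects and in B's
-- combined scan, so both ports share this helper). `none` = Python IndexError on `ends[i]`
-- (unterminated '{'): those inputs are excluded by Pre_sub_obj_Bk. `fuel` only makes the
-- recursion structural; the ports call it with fuel ≥ length, so the fuel-0 guard is never reached.
def pvBraceLoop (ends : List Char) : Nat → Nat → Int → List Char → Option (List Char × Nat)
  | 0, i, count, object =>
      if count = 0 then some (object, i) else none   -- fuel guard, never reached from the ports' calls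
  | fuel + 1, i, count, object =>
      if count = 0 then some (object, i)
      else
        match ends[i]? with
        | none => none     -- Python IndexError
        | some c =>
            pvBraceLoop ends fuel (i + 1)
              ((count + (if c = '{' then 1 else 0)) + (if c = '}' then -1 else 0))
              (object ++ [c])

-- get_objects: outer `while i < len(ends)` loop carrying the accumulators o (objects) and
-- start (indices); fuel-0 guard never reached (the index advances on every iteration)
def pvGetObjects (ends : List Char) : Nat → Nat → List String → List Int → Option (List String × List Int)
  | 0, _, _, _ => none
  | fuel + 1, i, o, start =>
    if h : i < ends.length then
      if ends[i] = '{' then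
        match pvBraceLoop ends (ends.length + 1) (i + 1) 1 ['{'] with
        | none => none
        | some (object, i') =>
            pvGetObjects ends fuel i' (o ++ [String.ofList object]) (start ++ [(i : Int)])
      else pvGetObjects ends fuel (i + 1) o start
    else some (o, start)

-- one iteration of A's reconstruction loop `for i in range(len(objects))`
-- (indices/objects are indexed with getD: i is always in range, the two lists have equal length)
def pvStepA (bs : List Char) (objects : List String) (indices : List Int)
    (acc : List Char × Int) (i : Nat) : List Char × Int :=
  let idx := indices.getD i 0
  (acc.1 ++ PySem.List.slice bs (some acc.2) (some idx) ++ ['[', 'B', 'k', ']'],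
   acc.2 + (idx - acc.2) + PySem.Str.len (objects.getD i ""))

def sub_obj_Bk (bigsmiles : String) : String × List String :=
  let bs := bigsmiles.toList
  -- Python calls get_objects twice; both calls are identical and pure, matched together here
  match pvGetObjects bs (bs.length + 1) 0 [] [], pvGetObjects bs (bs.length + 1) 0 [] [] with
  | some (objects, _), some (_, indices) =>
      let r := (List.range objects.length).foldl (pvStepA bs objects indices) ([], (0 : Int))
      (String.ofList (r.1 ++ PySem.List.slice bs (some r.2) none), objects)
  | _, _ => ("", [])   -- unreachable under Pre_: Python raises IndexError here

-- ===== PORT B =====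
-- B's single combined scan: copy plain characters; on '{' consume the whole balanced object
-- (the same inner while-loop, pvBraceLoop), emit "[Bk]" and record the object.
def pvScanB (s : List Char) : Nat → Nat → List Char → List String → Option (List Char × List String)
  | 0, _, _, _ => none
  | fuel + 1, i, out, objects =>
    if h : i < s.length then
      if s[i] = '{' then
        match pvBraceLoop s (s.length + 1) (i + 1) 1 ['{'] with
        | none => none
        | some (obj, i') =>
            pvScanB s fuel i' (out ++ ['[', 'B', 'k', ']']) (objects ++ [String.ofList obj])
      else pvScanB s fuel (i + 1) (out ++ [s[i]]) objects
    else some (out, objects)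

def sub_obj_Bk_alt (bigsmiles : String) : String × List String :=
  match pvScanB bigsmiles.toList (bigsmiles.toList.length + 1) 0 [] [] with
  | some (out, objects) => (String.ofList out, objects)
  | none => ("", [])   -- unreachable under Pre_: Python raises IndexError here

-- ===== PRECONDITION & SPEC =====
-- Pre_ excludes exactly the strings with an unmatched '{' (clamped brace-depth ends nonzero),
-- on which the Python A (and B) raises IndexError while consuming the unterminated object.
def Pre_sub_obj_Bk (bigsmiles : String) : Prop :=
  bigsmiles.toList.foldl
    (fun (d : Nat) c => if c = '{' then d + 1 else if c = '}' then d - 1 else d) 0 = 0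
instance (bigsmiles : String) : Decidable (Pre_sub_obj_Bk bigsmiles) := by
  unfold Pre_sub_obj_Bk; infer_instance

def pvWitness_sub_obj_Bk : String := "CC{[>][<]CC(C)[>][<]}{[>][<]CC[>][<]}O"

def Spec_sub_obj_Bk (bigsmiles : String) (out : String × List String) : Prop := out = sub_obj_Bk_alt bigsmiles
instance (bigsmiles : String) (out : String × List String) : Decidable (Spec_sub_obj_Bk bigsmiles out) := by unfold Spec_sub_obj_Bk; infer_instance

-- ===== CLAIM (what is proved, stated in full; the proofs are below) =====
def Claim_equal_sub_obj_Bk : Prop := ∀ (bigsmiles : String), Dom_sub_obj_Bk bigsmiles → Pre_sub_obj_Bk bigsmiles → Spec_sub_obj_Bk bigsmiles (sub_obj_Bk bigsmiles)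

-- ===== LEMMAS AND PROOFS =====

-- the string A reconstructs between/around the objects, written as a zipped recursion
def pvRecon (s : List Char) : Int → List String → List Int → List Char
  | c, [], _ => PySem.List.slice s (some c) none
  | c, _ :: _, [] => PySem.List.slice s (some c) none  -- never reached: equal lengths
  | c, obj :: objs, idx :: idxs =>
      PySem.List.slice s (some c) (some idx) ++ ['[', 'B', 'k', ']'] ++
        pvRecon s (idx + PySem.Str.len obj) objs idxs

theorem pvBraceLoop_le (ends : List Char) :
    ∀ (fuel i : Nat) (count : Int) (object : List Char) (r : List Char × Nat),
    pvBraceLoop ends fuel i count object = some r → i ≤ r.2 := by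
  intro fuel
  induction fuel with
  | zero =>
    intro i count object r h
    rw [pvBraceLoop] at h
    split_ifs at h with hc
    cases h; simp
  | succ fuel IH =>
    intro i count object r h
    rw [pvBraceLoop] at h
    split_ifs at h with hc
    · cases h; simp
    · revert h
      cases hg : ends[i]? with
      | none => intro h; cases h
      | some c =>
        intro h
        dsimp only at h
        have := IH _ _ _ _ h
        omega

theorem pvBraceLoop_spec (ends : List Char) :
    ∀ (fuel i : Nat) (count : Int) (object : List Char) (r : List Char × Nat),
    i ≤ ends.length → pvBraceLoop ends fuel i count object = some r →
    i ≤ r.2 ∧ r.2 ≤ ends.length ∧ r.1.length = object.length + (r.2 - i) := by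
  intro fuel
  induction fuel with
  | zero =>
    intro i count object r hi h
    rw [pvBraceLoop] at h
    split_ifs at h with hc
    cases h; simp [hi]
  | succ fuel IH =>
    intro i count object r hi h
    rw [pvBraceLoop] at h
    split_ifs at h with hc
    · cases h; simp [hi]
    · revert h
      cases hg : ends[i]? with
      | none => intro h; cases h
      | some c =>
        intro h
        dsimp only at h
        have hlt : i < ends.length := by
          by_contra hn
          simp [List.getElem?_eq_none (by omega : ends.length ≤ i)] at hg
        obtain ⟨h1, h2, h3⟩ := IH _ _ _ _ (by omega) h
        refine ⟨by omega, h2, ?_⟩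
        simp at h3
        omega

theorem pvGetObjects_acc (ends : List Char) :
    ∀ (fuel i : Nat) (o : List String) (start : List Int),
    pvGetObjects ends fuel i o start =
      (pvGetObjects ends fuel i [] []).map (fun p => (o ++ p.1, start ++ p.2)) := by
  intro fuel
  induction fuel with
  | zero => intro i o start; rw [pvGetObjects, pvGetObjects]; simp
  | succ fuel IH =>
    intro i o start
    rw [pvGetObjects, pvGetObjects]
    by_cases hlt : i < ends.length
    · simp only [dif_pos hlt]
      by_cases hc : ends[i] = '{'
      · simp only [if_pos hc]
        cases hB : pvBraceLoop ends (ends.length + 1) (i + 1) 1 ['{'] with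
        | none => simp
        | some r =>
          obtain ⟨ob, i'⟩ := r
          dsimp only
          rw [IH i' (o ++ [String.ofList ob]) (start ++ [(i : Int)]),
            IH i' ([] ++ [String.ofList ob]) ([] ++ [(i : Int)])]
          cases pvGetObjects ends fuel i' [] [] <;> simp
      · simp only [if_neg hc]
        rw [IH (i + 1) o start]
    · simp only [dif_neg hlt]
      simp

theorem pvScanB_acc (s : List Char) :
    ∀ (fuel i : Nat) (out : List Char) (objects : List String),
    pvScanB s fuel i out objects =
      (pvScanB s fuel i [] []).map (fun p => (out ++ p.1, objects ++ p.2)) := by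
  intro fuel
  induction fuel with
  | zero => intro i out objects; rw [pvScanB, pvScanB]; simp
  | succ fuel IH =>
    intro i out objects
    rw [pvScanB, pvScanB]
    by_cases hlt : i < s.length
    · simp only [dif_pos hlt]
      by_cases hc : s[i] = '{'
      · simp only [if_pos hc]
        cases hB : pvBraceLoop s (s.length + 1) (i + 1) 1 ['{'] with
        | none => simp
        | some r =>
          obtain ⟨ob, i'⟩ := r
          dsimp only
          rw [IH i' (out ++ ['[', 'B', 'k', ']']) (objects ++ [String.ofList ob]),
            IH i' ([] ++ ['[', 'B', 'k', ']']) ([] ++ [String.ofList ob])]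
          cases pvScanB s fuel i' [] [] <;> simp
      · simp only [if_neg hc]
        rw [IH (i + 1) (out ++ [s[i]]) objects, IH (i + 1) ([] ++ [s[i]]) []]
        cases pvScanB s fuel (i + 1) [] [] <;> simp
    · simp only [dif_neg hlt]
      simp

theorem pvSlice_from_cons (s : List Char) (i : Nat) (hi : i < s.length) :
    PySem.List.slice s (some (i : Int)) none = s[i] :: PySem.List.slice s (some ((i : Int) + 1)) none := by
  rw [PySem.List.slice_from_natCast]
  have : (i : Int) + 1 = ((i + 1 : Nat) : Int) := by push_cast; ring
  rw [this, PySem.List.slice_from_natCast]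
  exact List.drop_eq_getElem_cons hi

theorem pvSlice_cons (s : List Char) (i : Nat) (b : Int) (hi : i < s.length) (hb : (i : Int) < b) :
    PySem.List.slice s (some (i : Int)) (some b) =
      s[i] :: PySem.List.slice s (some ((i : Int) + 1)) (some b) := by
  have h0b : (0 : Int) ≤ b := by omega
  have : (i : Int) + 1 = ((i + 1 : Nat) : Int) := by push_cast; ring
  rw [this, PySem.List.slice_toNat s (Int.natCast_nonneg i) h0b,
    PySem.List.slice_toNat s (Int.natCast_nonneg (i + 1)) h0b]
  simp only [Int.toNat_natCast]
  rw [List.drop_eq_getElem_cons hi, show b.toNat - i = (b.toNat - (i + 1)) + 1 by omega,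
    List.take_succ_cons]

theorem pvSlice_nil (s : List Char) (c : Int) (h : 0 ≤ c) :
    PySem.List.slice s (some c) (some c) = [] := by
  rw [PySem.List.slice_toNat s h h]
  simp

-- head-extension of pvRecon past a non-object character
theorem pvRecon_cons (s : List Char) (i : Nat) (objs : List String) (idxs : List Int)
    (hi : i < s.length) (hb : ∀ x ∈ idxs, (i : Int) + 1 ≤ x) :
    pvRecon s (i : Int) objs idxs = s[i] :: pvRecon s ((i : Int) + 1) objs idxs := by
  match objs, idxs with
  | [], _ => exact pvSlice_from_cons s i hi
  | _ :: _, [] => exact pvSlice_from_cons s i hi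
  | obj :: objs, idx :: idxs =>
      have hidx : (i : Int) < idx := by have := hb idx (by simp); omega
      simp only [pvRecon]
      rw [pvSlice_cons s i idx hi hidx]
      simp

-- A's foldl-over-range reconstruction equals the zipped recursion pvRecon
theorem pvFoldA_eq_recon (s : List Char) (objs : List String) (idxs : List Int) :
    ∀ (c : Int) (acc : List Char), idxs.length = objs.length →
    (((List.range objs.length).foldl (pvStepA s objs idxs) (acc, c)).1 ++
      PySem.List.slice s (some ((List.range objs.length).foldl (pvStepA s objs idxs) (acc, c)).2) none)
      = acc ++ pvRecon s c objs idxs := by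
  induction objs generalizing idxs with
  | nil => intro c acc _; simp [pvRecon]
  | cons obj objs ih =>
    intro c acc h
    cases idxs with
    | nil => simp at h
    | cons idx idxs =>
      simp only [List.length_cons, List.range_succ_eq_map, List.foldl_cons, List.foldl_map]
      have hshift : ∀ (b : List Char × Int) (j : Nat),
          pvStepA s (obj :: objs) (idx :: idxs) b (Nat.succ j) = pvStepA s objs idxs b j := by
        intro b j
        simp [pvStepA]
      simp only [hshift]
      have hstep : pvStepA s (obj :: objs) (idx :: idxs) (acc, c) 0 =
          (acc ++ PySem.List.slice s (some c) (some idx) ++ ['[', 'B', 'k', ']'],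
            idx + PySem.Str.len obj) := by
        simp only [pvStepA, List.getD_cons_zero]
        refine Prod.ext rfl ?_
        simp
      rw [hstep, ih idxs (idx + PySem.Str.len obj) _ (by simpa using h)]
      simp [pvRecon]

-- the central lemma: A's two-phase computation from index i equals B's one-pass scan from i
theorem pvMain (s : List Char) :
    ∀ (fuel i : Nat) (objs : List String) (idxs : List Int), i ≤ s.length →
      pvGetObjects s fuel i [] [] = some (objs, idxs) →
      idxs.length = objs.length ∧ (∀ x ∈ idxs, (i : Int) ≤ x) ∧
        pvScanB s fuel i [] [] = some (pvRecon s (i : Int) objs idxs, objs) := by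
  intro fuel
  induction fuel with
  | zero => intro i objs idxs _ hA; rw [pvGetObjects] at hA; cases hA
  | succ fuel IH =>
    intro i objs idxs hile hA
    by_cases hlt : i < s.length
    · by_cases hc : s[i] = '{'
      · -- object position: consume the balanced object on both sides
        rw [pvGetObjects] at hA
        simp only [dif_pos hlt, if_pos hc] at hA
        rw [pvScanB]
        simp only [dif_pos hlt, if_pos hc]
        revert hA
        cases hB : pvBraceLoop s (s.length + 1) (i + 1) 1 ['{'] with
        | none => intro hA; exact absurd hA (by simp)
        | some r =>
          obtain ⟨ob, i'⟩ := r
          intro hA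
          dsimp only at hA ⊢
          obtain ⟨h1, h2, h3⟩ := pvBraceLoop_spec s (s.length + 1) (i + 1) 1 ['{'] (ob, i') (by omega) hB
          simp only at h1 h2 h3
          rw [pvGetObjects_acc s fuel i'] at hA
          cases hA' : pvGetObjects s fuel i' [] [] with
          | none => rw [hA'] at hA; exact absurd hA (by simp)
          | some r' =>
            obtain ⟨objs', idxs'⟩ := r'
            rw [hA'] at hA
            simp only [Option.map_some, Option.some.injEq, Prod.mk.injEq] at hA
            obtain ⟨hobjs, hidxs⟩ := hA
            obtain ⟨hlen', hbd', hscan'⟩ := IH i' objs' idxs' h2 hA'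
            refine ⟨by simp [← hobjs, ← hidxs, hlen'], ?_, ?_⟩
            · intro x hx
              rw [← hidxs] at hx
              rcases List.mem_cons.mp hx with h | h
              · omega
              · have := hbd' x h; omega
            · rw [pvScanB_acc s fuel i', hscan']
              simp only [Option.map_some, Option.some.injEq, Prod.mk.injEq]
              constructor
              · rw [← hobjs, ← hidxs]
                simp only [List.nil_append, List.singleton_append]
                simp only [pvRecon]
                rw [pvSlice_nil s (i : Int) (by positivity)]
                have hlenmk : PySem.Str.len (String.ofList ob) = ((i' : Int) - (i : Int)) := by
                  rw [PySem.Str.len_eq]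
                  simp [h3]
                  omega
                rw [hlenmk]
                have : (i : Int) + ((i' : Int) - (i : Int)) = (i' : Int) := by ring
                simp [this]
              · rw [← hobjs]
      · -- plain character: copied verbatim
        rw [pvGetObjects] at hA
        simp only [dif_pos hlt, if_neg hc] at hA
        obtain ⟨hlen', hbd', hscan'⟩ := IH (i + 1) objs idxs (by omega) hA
        refine ⟨hlen', ?_, ?_⟩
        · intro x hx; have := hbd' x hx; omega
        · rw [pvScanB]
          simp only [dif_pos hlt, if_neg hc]
          rw [pvScanB_acc s fuel (i + 1), hscan']
          simp only [Option.map_some, Option.some.injEq, Prod.mk.injEq, List.nil_append]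
          refine ⟨?_, trivial⟩
          rw [pvRecon_cons s i objs idxs hlt (by intro x hx; have := hbd' x hx; push_cast; omega)]
          push_cast
          simp
    · -- i = length: both loops finish
      have hieq : i = s.length := by omega
      rw [pvGetObjects] at hA
      simp only [dif_neg hlt] at hA
      obtain ⟨hobjs, hidxs⟩ : ([] : List String) = objs ∧ ([] : List Int) = idxs := by
        simpa using hA
      rw [pvScanB]
      simp only [dif_neg hlt]
      refine ⟨by simp [← hobjs, ← hidxs], by intro x hx; rw [← hidxs] at hx; simp at hx, ?_⟩
      rw [← hobjs, ← hidxs]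
      simp only [pvRecon, Option.some.injEq, Prod.mk.injEq]
      rw [PySem.List.slice_from_natCast]
      simp [hieq]

-- clamped brace depth of the tail, for the totality argument
def pvDepth (l : List Char) (d : Nat) : Nat :=
  l.foldl (fun (d : Nat) c => if c = '{' then d + 1 else if c = '}' then d - 1 else d) d

theorem pvDepth_cons (x : Char) (l : List Char) (d : Nat) :
    pvDepth (x :: l) d = pvDepth l (if x = '{' then d + 1 else if x = '}' then d - 1 else d) := by
  simp only [pvDepth, List.foldl_cons]

theorem pvBraceLoop_zero (ends : List Char) (fuel i : Nat) (ob : List Char) :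
    pvBraceLoop ends fuel i 0 ob = some (ob, i) := by
  cases fuel <;> rw [pvBraceLoop] <;> simp

theorem pvBraceLoop_total (s : List Char) :
    ∀ (fuel j c : Nat) (ob : List Char), s.length - j ≤ fuel → 0 < c →
      pvDepth (s.drop j) c = 0 →
      ∃ r, pvBraceLoop s fuel j (c : Int) ob = some r ∧ pvDepth (s.drop r.2) 0 = 0 := by
  intro fuel
  induction fuel with
  | zero =>
    intro j c ob hf hc hdep
    exfalso
    rw [List.drop_eq_nil_of_le (by omega)] at hdep
    simp [pvDepth] at hdep
    omega
  | succ fuel IH =>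
    intro j c ob hf hc hdep
    by_cases hj : j < s.length
    · rw [pvBraceLoop]
      rw [if_neg (show ¬((c : Int) = 0) by exact_mod_cast Nat.pos_iff_ne_zero.mp hc)]
      rw [List.drop_eq_getElem_cons hj, pvDepth_cons] at hdep
      cases hget : s[j]? with
      | none => exact absurd hget (by simp [hj])
      | some ch =>
        dsimp only
        have hch : ch = s[j] := by
          have h := List.getElem?_eq_getElem hj
          rw [hget] at h
          exact Option.some_inj.mp h
        by_cases h1 : ch = '{'
        · have hdep' : pvDepth (s.drop (j + 1)) (c + 1) = 0 := by
            rw [if_pos (hch ▸ h1)] at hdep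
            exact hdep
          obtain ⟨r, hr, hr0⟩ := IH (j + 1) (c + 1) (ob ++ [ch]) (by omega) (by omega) hdep'
          refine ⟨r, ?_, hr0⟩
          rw [show ((c : Int) + (if ch = '{' then (1 : Int) else 0)) + (if ch = '}' then (-1 : Int) else 0)
              = ((c + 1 : Nat) : Int) by simp [h1]]
          exact hr
        · by_cases h2 : ch = '}'
          · have hdep' : pvDepth (s.drop (j + 1)) (c - 1) = 0 := by
              rw [if_neg (hch ▸ h1), if_pos (hch ▸ h2)] at hdep
              exact hdep
            by_cases hc1 : c = 1
            · refine ⟨(ob ++ [ch], j + 1), ?_, ?_⟩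
              · rw [show ((c : Int) + (if ch = '{' then (1 : Int) else 0)) + (if ch = '}' then (-1 : Int) else 0)
                    = 0 by simp [h2, hc1]]
                exact pvBraceLoop_zero s fuel (j + 1) (ob ++ [ch])
              · simpa [hc1] using hdep'
            · obtain ⟨r, hr, hr0⟩ := IH (j + 1) (c - 1) (ob ++ [ch]) (by omega) (by omega) hdep'
              refine ⟨r, ?_, hr0⟩
              rw [show ((c : Int) + (if ch = '{' then (1 : Int) else 0)) + (if ch = '}' then (-1 : Int) else 0)
                  = ((c - 1 : Nat) : Int) by simp [h1, h2]; omega]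
              exact hr
          · have hdep' : pvDepth (s.drop (j + 1)) c = 0 := by
              rw [if_neg (hch ▸ h1), if_neg (hch ▸ h2)] at hdep
              exact hdep
            obtain ⟨r, hr, hr0⟩ := IH (j + 1) c (ob ++ [ch]) (by omega) (by omega) hdep'
            refine ⟨r, ?_, hr0⟩
            rw [show ((c : Int) + (if ch = '{' then (1 : Int) else 0)) + (if ch = '}' then (-1 : Int) else 0)
                = (c : Int) by simp [h1, h2]]
            exact hr
    · exfalso
      rw [List.drop_eq_nil_of_le (by omega)] at hdep
      simp [pvDepth] at hdep
      omega

theorem pvGetObjects_total (s : List Char) :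
    ∀ (fuel i : Nat), s.length - i < fuel → pvDepth (s.drop i) 0 = 0 →
      ∃ r, pvGetObjects s fuel i [] [] = some r := by
  intro fuel
  induction fuel with
  | zero => intro i hf _; omega
  | succ fuel IH =>
    intro i hf hdep
    rw [pvGetObjects]
    by_cases hlt : i < s.length
    · simp only [dif_pos hlt]
      by_cases hc : s[i] = '{'
      · simp only [if_pos hc]
        have hdep1 : pvDepth (s.drop (i + 1)) 1 = 0 := by
          rw [List.drop_eq_getElem_cons hlt, pvDepth_cons, if_pos hc] at hdep
          exact hdep
        obtain ⟨r, hr, hr0⟩ := pvBraceLoop_total s (s.length + 1) (i + 1) 1 ['{'] (by omega) (by omega) hdep1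
        have hr' : pvBraceLoop s (s.length + 1) (i + 1) 1 ['{'] = some r := by exact_mod_cast hr
        cases hkey : pvBraceLoop s (s.length + 1) (i + 1) 1 ['{'] with
        | none => rw [hkey] at hr'; cases hr'
        | some r2 =>
          rw [hkey] at hr'
          injection hr' with hr'
          subst hr'
          obtain ⟨ob, i'⟩ := r2
          dsimp only
          have hle : i + 1 ≤ i' := by simpa using pvBraceLoop_le s (s.length + 1) (i + 1) 1 ['{'] _ hkey
          obtain ⟨r3, hr3⟩ := IH i' (by omega) hr0
          rw [pvGetObjects_acc s fuel i', hr3]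
          exact ⟨_, rfl⟩
      · simp only [if_neg hc]
        have hdep' : pvDepth (s.drop (i + 1)) 0 = 0 := by
          rw [List.drop_eq_getElem_cons hlt, pvDepth_cons] at hdep
          by_cases h2 : s[i] = '}'
          · simp only [if_neg hc, if_pos h2] at hdep; simpa using hdep
          · simp only [if_neg hc, if_neg h2] at hdep; simpa using hdep
        exact IH (i + 1) (by omega) hdep'
    · simp only [dif_neg hlt]
      exact ⟨_, rfl⟩

-- ===== VERDICT (by name: the statement is the Claim_ definition above) =====
theorem sub_obj_Bk_spec : Claim_equal_sub_obj_Bk := by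
  intro bigsmiles _ hpre
  unfold Spec_sub_obj_Bk
  have hdep : pvDepth (bigsmiles.toList.drop 0) 0 = 0 := by
    simpa [pvDepth] using hpre
  obtain ⟨⟨objs, idxs⟩, hr⟩ := pvGetObjects_total bigsmiles.toList (bigsmiles.toList.length + 1) 0 (by omega) hdep
  obtain ⟨hlen, _, hscan⟩ := pvMain bigsmiles.toList (bigsmiles.toList.length + 1) 0 objs idxs (by omega) hr
  have hfold := pvFoldA_eq_recon bigsmiles.toList objs idxs 0 [] hlen
  simp only [sub_obj_Bk, sub_obj_Bk_alt, hr, hscan, hfold]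
  simpa using congrArg (fun l => (String.ofList l, objs)) hfold
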